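-- pv_equiv track=rewrite | github.com/Since1578/meter-query | mainwindow/mainwindow_function.py | alignment_hour
-- ===== SOURCE A (Python) =====
-- import copy
--
-- def alignment_hour(datas):
--     '''
--     对所有场站每小时的耗电量进行累加
--     @param datas: [[position，{“2023-03-20”:{"2023-03-20 17:00": 125, "2023-03-20 18:00": 225, ...}, ...}], ...]
--     @return: [{“2023-03-20”:{"2023-03-20 17:00": 125, "2023-03-20 18:00": 225, ...}, ...}, {“2023-03-21”:{....}}]
--     '''
--     total_hour_meter = []
--     whole_day = ['0' + str(i) + ':00' if len(str(i)) == 1 else str(i) + ":00" for i in range(24)]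
--     #  构造三天*24h数据
--     for i in range(3):
--         total_hour_meter.append({})
--         for hour in whole_day:
--             total_hour_meter[-1][hour] = []
--     day_list = []
--     for index, values in enumerate(datas):
--         #  循环每一个天数据
--         which_day = -1
--         for key, value in values[1].items():
--             which_day += 1
--             if key not in day_list:
--                 day_list.append(key)
--             #  累加每个场站每小时的统计值
--             for hour, hour_value in value.items():
--                 if hour[-5:] in total_hour_meter[which_day]:
--                     total_hour_meter[which_day][hour[-5:]].append(hour_value)
--     total_hour_meter_temp = copy.deepcopy(total_hour_meter)
--     for day, values in enumerate(total_hour_meter_temp):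
--         day_hour_list = list(values.keys())
--         for hour in day_hour_list:
--             total_hour_meter[day][hour] = sum(total_hour_meter_temp[day][hour])
--     return total_hour_meter
-- ===== SOURCE B (Python) =====
-- def alignment_hour(datas):
--     '''
--     Sum hourly electricity consumption across stations: single pass with scalar
--     accumulators (no list collection, no deepcopy, no second summing pass).
--     '''
--     hours = [str(i).zfill(2) + ':00' for i in range(24)]
--     total = [dict.fromkeys(hours, 0) for _ in range(3)]
--     for _position, days in datas:
--         for which_day, day_hours in enumerate(days.values()):
--             for hour, hour_value in day_hours.items():
--                 h = hour[-5:]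
--                 if h in total[which_day]:
--                     total[which_day][h] += hour_value
--     return total
-- ===== Notes on version B (the rewrite author's own statement) =====
-- stated objective: simpler
-- what changed: B replaces A's collect-lists-into-a-3x24-skeleton, deepcopy, and second summing pass by a single pass that keeps running integer sums directly in the 3x24 structure (dict.fromkeys + enumerate), dropping the dead day_list, the deepcopy and the whole final loop.
import Mathlib
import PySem

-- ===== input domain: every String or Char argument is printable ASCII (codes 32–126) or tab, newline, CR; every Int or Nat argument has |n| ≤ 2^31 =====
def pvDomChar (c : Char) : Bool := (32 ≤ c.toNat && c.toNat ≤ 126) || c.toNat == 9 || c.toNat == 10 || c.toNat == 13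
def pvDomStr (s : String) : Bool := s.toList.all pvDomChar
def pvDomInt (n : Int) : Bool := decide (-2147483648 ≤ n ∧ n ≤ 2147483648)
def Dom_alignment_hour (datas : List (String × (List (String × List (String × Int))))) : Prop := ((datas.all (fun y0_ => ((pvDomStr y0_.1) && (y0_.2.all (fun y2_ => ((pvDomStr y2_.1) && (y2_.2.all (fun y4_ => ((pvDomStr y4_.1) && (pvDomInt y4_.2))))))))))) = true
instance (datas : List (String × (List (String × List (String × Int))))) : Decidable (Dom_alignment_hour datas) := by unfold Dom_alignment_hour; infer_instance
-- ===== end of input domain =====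

-- B keeps running integer sums in one pass instead of A's collect-lists / deepcopy / second summing pass (objective: simpler).

-- ===== PORT A =====
-- whole_day = ['0'+str(i)+':00' if len(str(i)) == 1 else str(i)+":00" for i in range(24)]
def wholeDayA : List String :=
  (PySem.List.pyRange 0 24 1).map (fun i =>
    if PySem.Str.len (PySem.Int.toStr i) = 1 then
      PySem.Str.join "" ["0", PySem.Int.toStr i, ":00"]
    else PySem.Str.join "" [PySem.Int.toStr i, ":00"])

-- total_hour_meter.append({}); for hour in whole_day: total_hour_meter[-1][hour] = []
def initDayA : PySem.Dict String (List Int) :=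
  wholeDayA.foldl (fun d h => d.insert h ([] : List Int)) PySem.Dict.empty

-- body of 'for hour, hour_value in value.items()':
--   if hour[-5:] in total_hour_meter[which_day]: total_hour_meter[which_day][hour[-5:]].append(hour_value)
def hourStepA (wd : Int) (t : List (PySem.Dict String (List Int))) (hv : String × Int) :
    List (PySem.Dict String (List Int)) :=
  let h := PySem.Str.slice hv.1 (some (-5)) none
  match PySem.List.pyGet? t wd with
  | some d => if d.contains h then PySem.List.pySetD t wd (d.insert h (d.getD h [] ++ [hv.2])) else t
  | none => t   -- Python raises IndexError here; such inputs are excluded by Pre_alignment_hour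

-- body of 'for key, value in values[1].items()' with state (which_day, day_list, total_hour_meter)
def dayStepA (st : Int × List String × List (PySem.Dict String (List Int)))
    (kv : String × List (String × Int)) :
    Int × List String × List (PySem.Dict String (List Int)) :=
  let wd := st.1 + 1
  let dl := if kv.1 ∈ st.2.1 then st.2.1 else st.2.1 ++ [kv.1]
  (wd, dl, kv.2.foldl (hourStepA wd) st.2.2)

def alignment_hour (datas : List (String × (List (String × List (String × Int))))) : List (List (String × Int)) :=
  -- for i in range(3): append {} and fill 24 hour keys with []
  let total0 : List (PySem.Dict String (List Int)) :=
    (PySem.List.pyRange 0 3 1).foldl (fun acc _ => acc ++ [initDayA]) []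
  -- for index, values in enumerate(datas): which_day = -1; for key, value in values[1].items(): …
  let fin := datas.foldl
    (fun (st : List String × List (PySem.Dict String (List Int))) station =>
      let r := station.2.foldl dayStepA (-1, st.1, st.2)
      (r.2.1, r.2.2)) ([], total0)
  -- final pass: each dict's values (lists) are replaced by their sums, key by key, in key order
  -- (hand-ported: Python mutates the dict changing the value type list -> int, which cannot be typed in place)
  fin.2.map (fun d => d.keys.foldl (fun acc h => acc ++ [(h, (d.getD h []).sum)]) ([] : List (String × Int)))

-- ===== PORT B =====
-- hours = [str(i).zfill(2) + ':00' for i in range(24)]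
def hoursB : List String :=
  (PySem.List.pyRange 0 24 1).map (fun i =>
    PySem.Str.join "" [PySem.Str.zfill (PySem.Int.toStr i) 2, ":00"])

-- dict.fromkeys(hours, 0)
def initDayB : PySem.Dict String Int :=
  PySem.Dict.ofList (hoursB.map (fun h => (h, (0 : Int))))

-- body of 'for hour, hour_value in day_hours.items()':
--   if hour[-5:] in total[which_day]: total[which_day][hour[-5:]] += hour_value
def hourStepB (wd : Int) (t : List (PySem.Dict String Int)) (hv : String × Int) :
    List (PySem.Dict String Int) :=
  let h := PySem.Str.slice hv.1 (some (-5)) none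
  match PySem.List.pyGet? t wd with
  | some d => if d.contains h then PySem.List.pySetD t wd (d.insert h (d.getD h 0 + hv.2)) else t
  | none => t   -- Python raises IndexError here; such inputs are excluded by Pre_alignment_hour

def alignment_hour_alt (datas : List (String × (List (String × List (String × Int))))) : List (List (String × Int)) :=
  let total0 : List (PySem.Dict String Int) :=
    (PySem.List.pyRange 0 3 1).map (fun _ => initDayB)
  (datas.foldl
    (fun t station =>
      (PySem.List.enumerate (station.2.map (·.2)) 0).foldl
        (fun t p => p.2.foldl (hourStepB p.1) t) t)
    total0).map PySem.Dict.items

-- ===== PRECONDITION & SPEC =====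
-- Pre_ excludes exactly the inputs on which A raises IndexError: a station whose inner day-dict
-- has a 4th (or later) day with a non-empty hour-dict makes A index total_hour_meter[3].
def Pre_alignment_hour (datas : List (String × (List (String × List (String × Int))))) : Prop :=
  ∀ s ∈ datas, ∀ p ∈ s.2.drop 3, p.2 = []
instance (datas : List (String × (List (String × List (String × Int))))) : Decidable (Pre_alignment_hour datas) := by unfold Pre_alignment_hour; infer_instance

def pvWitness_alignment_hour : (List (String × (List (String × List (String × Int))))) :=
  [("station1", [("2023-03-20", [("2023-03-20 17:00", 125), ("2023-03-20 18:00", 225)]),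
                 ("2023-03-21", [("2023-03-21 17:00", 50)])])]

def Spec_alignment_hour (datas : List (String × (List (String × List (String × Int))))) (out : List (List (String × Int))) : Prop := out = alignment_hour_alt datas
instance (datas : List (String × (List (String × List (String × Int))))) (out : List (List (String × Int))) : Decidable (Spec_alignment_hour datas out) := by unfold Spec_alignment_hour; infer_instance

-- ===== CLAIM (what is proved, stated in full; the proofs are below) =====
def Claim_equal_alignment_hour : Prop := ∀ (datas : List (String × (List (String × List (String × Int))))), Dom_alignment_hour datas → Pre_alignment_hour datas → Spec_alignment_hour datas (alignment_hour datas)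

-- ===== LEMMAS AND PROOFS =====

-- mapping a per-hour list of values to its sum, itemwise
def sumItems (l : List (String × List Int)) : List (String × Int) :=
  l.map (fun p => (p.1, p.2.sum))

-- the simulation relation between an A-side day dict and a B-side day dict
def RelDay (dA : PySem.Dict String (List Int)) (dB : PySem.Dict String Int) : Prop :=
  dB.items = sumItems dA.items ∧ dA.keys.Nodup

lemma relDay_keys {dA : PySem.Dict String (List Int)} {dB : PySem.Dict String Int}
    (h : RelDay dA dB) : dB.keys = dA.keys := by
  obtain ⟨hi, _⟩ := h
  simp [PySem.Dict.keys, hi, sumItems, List.map_map]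

lemma relDay_contains {dA : PySem.Dict String (List Int)} {dB : PySem.Dict String Int}
    (h : RelDay dA dB) (k : String) : dB.contains k = dA.contains k := by
  rw [PySem.Dict.contains_eq_decide_mem_keys, PySem.Dict.contains_eq_decide_mem_keys,
      relDay_keys h]

lemma relDay_insert {dA : PySem.Dict String (List Int)} {dB : PySem.Dict String Int}
    (h : RelDay dA dB) {k : String} (hc : dA.contains k = true) (v : Int) :
    RelDay (dA.insert k (dA.getD k [] ++ [v])) (dB.insert k (dB.getD k 0 + v)) := by
  obtain ⟨hi, hnd⟩ := h
  have hcB : dB.contains k = true := (relDay_contains ⟨hi, hnd⟩ k).trans hc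
  have hk : k ∈ dA.keys := (PySem.Dict.contains_iff_mem_keys dA k).mp hc
  obtain ⟨⟨k', vl⟩, hmem, hk'⟩ := List.mem_map.mp hk
  subst hk'
  have hgA : dA.getD k' [] = vl := PySem.Dict.getD_of_mem_items dA hmem hnd []
  have hmemB : (k', vl.sum) ∈ dB.items := by
    rw [hi]; exact List.mem_map_of_mem hmem
  have hndB : dB.keys.Nodup := by rw [relDay_keys ⟨hi, hnd⟩]; exact hnd
  have hgB : dB.getD k' 0 = vl.sum := PySem.Dict.getD_of_mem_items dB hmemB hndB 0
  constructor
  · rw [PySem.Dict.items_insert_of_contains dB _ hcB,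
        PySem.Dict.items_insert_of_contains dA _ hc, hi]
    simp only [sumItems, List.map_map]
    refine List.map_congr_left ?_
    intro p hp
    by_cases hpk : p.1 == k'
    · simp [Function.comp, hpk, hgA, hgB]
    · simp [Function.comp, hpk]
  · rw [PySem.Dict.keys_insert_of_contains dA _ hc]; exact hnd

lemma relDay_init : RelDay initDayA initDayB := by
  constructor
  · decide
  · decide

-- the relation lifted pointwise to the three-day lists
def RelT (tA : List (PySem.Dict String (List Int))) (tB : List (PySem.Dict String Int)) : Prop :=
  List.Forall₂ RelDay tA tB

lemma relT_get {tA tB} (h : RelT tA tB) (n : Nat) :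
    (PySem.List.pyGet? tA (n : Int) = none ∧ PySem.List.pyGet? tB (n : Int) = none) ∨
    ∃ dA dB, PySem.List.pyGet? tA (n : Int) = some dA ∧ PySem.List.pyGet? tB (n : Int) = some dB ∧ RelDay dA dB := by
  rw [PySem.List.pyGet?_of_nonneg _ (Int.natCast_nonneg n),
      PySem.List.pyGet?_of_nonneg _ (Int.natCast_nonneg n), Int.toNat_natCast]
  induction h generalizing n with
  | nil => left; simp
  | cons hd tl ih =>
    cases n with
    | zero => right; exact ⟨_, _, rfl, rfl, hd⟩
    | succ m => simpa using ih m

lemma relT_set {tA tB} (h : RelT tA tB) (n : Nat) {dA dB} (hd : RelDay dA dB) :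
    RelT (PySem.List.pySetD tA (n : Int) dA) (PySem.List.pySetD tB (n : Int) dB) := by
  rw [PySem.List.pySetD_natCast, PySem.List.pySetD_natCast]
  induction h generalizing n with
  | nil => exact .nil
  | cons hdr tlr ih =>
    cases n with
    | zero => exact .cons hd (by assumption)
    | succ m => exact .cons (by assumption) (ih m)

lemma relT_hourStep {tA tB} (h : RelT tA tB) (n : Nat) (hv : String × Int) :
    RelT (hourStepA (n : Int) tA hv) (hourStepB (n : Int) tB hv) := by
  rcases relT_get h n with ⟨hA, hB⟩ | ⟨dA, dB, hA, hB, hrel⟩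
  · simp only [hourStepA, hourStepB, hA, hB]; exact h
  · simp only [hourStepA, hourStepB, hA, hB, relDay_contains hrel]
    split_ifs with hc
    · exact relT_set h n (relDay_insert hrel hc hv.2)
    · exact h

lemma relT_hourFold {tA tB} (h : RelT tA tB) (n : Nat) (hm : List (String × Int)) :
    RelT (hm.foldl (hourStepA (n : Int)) tA) (hm.foldl (hourStepB (n : Int)) tB) := by
  induction hm generalizing tA tB with
  | nil => exact h
  | cons hv hm ih => exact ih (relT_hourStep h n hv)

lemma relT_dayFold (days : List (String × List (String × Int))) :
    ∀ (n : Nat) (dl : List String) tA tB, RelT tA tB →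
    RelT (days.foldl dayStepA ((n : Int) - 1, dl, tA)).2.2
         ((PySem.List.enumerate (days.map (·.2)) (n : Int)).foldl
            (fun t p => p.2.foldl (hourStepB p.1) t) tB) := by
  induction days with
  | nil =>
    intro n dl tA tB h
    simpa [PySem.List.enumerate] using h
  | cons kv days ih =>
    intro n dl tA tB h
    have harg : (n : Int) - 1 + 1 = ((n : Int)) := by ring
    simp only [List.foldl_cons, List.map_cons, PySem.List.enumerate_cons, dayStepA, harg]
    have hstep := relT_hourFold h n kv.2
    have hmain := ih (n + 1) (if kv.1 ∈ dl then dl else dl ++ [kv.1]) _ _ hstep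
    have hcast : ((n + 1 : Nat) : Int) - 1 = (n : Int) := by push_cast; ring
    have hcast2 : ((n + 1 : Nat) : Int) = (n : Int) + 1 := by push_cast; ring
    rw [hcast, hcast2] at hmain
    exact hmain

lemma relT_stationFold (datas : List (String × (List (String × List (String × Int))))) :
    ∀ (dl : List String) tA tB, RelT tA tB →
    RelT (datas.foldl
            (fun (st : List String × List (PySem.Dict String (List Int))) station =>
              let r := station.2.foldl dayStepA (-1, st.1, st.2)
              (r.2.1, r.2.2)) (dl, tA)).2
         (datas.foldl
            (fun t station =>
              (PySem.List.enumerate (station.2.map (·.2)) 0).foldl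
                (fun t p => p.2.foldl (hourStepB p.1) t) t) tB) := by
  induction datas with
  | nil => intro dl tA tB h; exact h
  | cons station datas ih =>
    intro dl tA tB h
    simp only [List.foldl_cons]
    have h0 : (-1 : Int) = ((0 : Nat) : Int) - 1 := by norm_num
    refine ih _ _ _ ?_
    rw [h0]
    exact relT_dayFold station.2 0 dl tA tB h

lemma relDay_out {dA : PySem.Dict String (List Int)} {dB : PySem.Dict String Int}
    (h : RelDay dA dB) :
    dA.keys.foldl (fun acc h => acc ++ [(h, (dA.getD h []).sum)]) ([] : List (String × Int)) = dB.items := by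
  rw [PySem.List.foldl_append_singleton_eq_map (fun h => (h, (dA.getD h []).sum)) dA.keys []]
  rw [List.nil_append, h.1, PySem.Dict.items_eq_map_keys dA h.2 []]
  simp [sumItems, List.map_map]

lemma relT_out {tA tB} (h : RelT tA tB) :
    tA.map (fun d => d.keys.foldl (fun acc h => acc ++ [(h, (d.getD h []).sum)]) ([] : List (String × Int)))
      = tB.map PySem.Dict.items := by
  induction h with
  | nil => rfl
  | cons hd tl ih => simp only [List.map_cons, ih, relDay_out hd]

-- ===== VERDICT (by name: the statement is the Claim_ definition above) =====
theorem alignment_hour_spec : Claim_equal_alignment_hour := by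
  intro datas _hdom _hpre
  unfold Spec_alignment_hour alignment_hour alignment_hour_alt
  have h0 : RelT ((PySem.List.pyRange 0 3 1).foldl (fun acc _ => acc ++ [initDayA]) [])
                 ((PySem.List.pyRange 0 3 1).map (fun _ => initDayB)) := by
    show RelT [initDayA, initDayA, initDayA] [initDayB, initDayB, initDayB]
    exact .cons relDay_init (.cons relDay_init (.cons relDay_init .nil))
  exact relT_out (relT_stationFold datas [] _ _ h0)
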